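-- pv_equiv track=rewrite | github.com/elitcloud/elit | elit/dep/common/utils.py | bmes_to_index
-- ===== SOURCE A (Python) =====
-- def bmes_to_index(tags):
--     """
--     Args:
--         tags: [4, 4, 0, 0, ...] sequence of labels
--     Returns:
--         list of (chunk_type, chunk_start, chunk_end)
--
--     Example:
--         seq = [4, 5, 0, 3]
--         tags = {"B-PER": 4, "I-PER": 5, "B-LOC": 3}
--         result = [("PER", 0, 2), ("LOC", 3, 4)]
--     """
--     result = []
--     if len(tags) == 0:
--         return result
--     word = (0, 0)
--
--     for i, t in enumerate(tags):
--         if i == 0: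
--             word = (0, 0)
--         elif t == 'B' or t == 'S':
--             result.append(word)
--             word = (i, 0)
--         word = (word[0], word[1] + 1)
--     if word[1] != 0:
--         result.append(word)
--     return result
-- ===== SOURCE B (Python) =====
-- def bmes_to_index(tags):
--     if not tags:
--         return []
--     starts = [0] + [i for i in range(1, len(tags)) if tags[i] == 'B' or tags[i] == 'S']
--     return [(s, e - s) for s, e in zip(starts, starts[1:] + [len(tags)])]
-- ===== Notes on version B (the rewrite author's own statement) =====
-- stated objective: alternative
-- what changed: Replaces A's running (start,count) accumulator with an explicit table of chunk-start indices built in one pass, then pairwise construction of (start, length) spans from consecutive boundaries.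
import Mathlib
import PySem

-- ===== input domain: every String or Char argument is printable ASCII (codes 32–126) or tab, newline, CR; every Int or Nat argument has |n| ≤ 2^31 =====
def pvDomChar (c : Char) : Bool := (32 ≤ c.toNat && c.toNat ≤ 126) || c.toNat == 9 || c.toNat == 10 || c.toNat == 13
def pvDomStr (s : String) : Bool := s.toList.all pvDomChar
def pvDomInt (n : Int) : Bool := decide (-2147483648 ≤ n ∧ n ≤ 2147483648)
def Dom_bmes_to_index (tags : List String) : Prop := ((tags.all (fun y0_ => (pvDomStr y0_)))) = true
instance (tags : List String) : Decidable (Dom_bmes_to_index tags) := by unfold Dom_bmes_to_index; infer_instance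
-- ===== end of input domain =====

-- B replaces A's running (start,count) accumulator with a chunk-start boundary table
-- followed by pairwise span construction (objective: alternative decomposition; same cost).

-- ===== PORT A =====
-- loop body of A's `for i, t in enumerate(tags)`; state = (result, word)
def bmesStep (st : List (Int × Int) × (Int × Int)) (it : Int × String) :
    List (Int × Int) × (Int × Int) :=
  let rw : List (Int × Int) × (Int × Int) :=
    if it.1 = 0 then (st.1, (0, 0))
    else if it.2 = "B" ∨ it.2 = "S" then (st.1 ++ [st.2], (it.1, 0))
    else (st.1, st.2)
  (rw.1, (rw.2.1, rw.2.2 + 1))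

def bmes_to_index (tags : List String) : List (Int × Int) :=
  if tags.length = 0 then []
  else
    let fin := (PySem.List.enumerate tags 0).foldl bmesStep ([], (0, 0))
    if fin.2.2 ≠ 0 then fin.1 ++ [fin.2] else fin.1

-- ===== PORT B =====
def bmes_to_index_alt (tags : List String) : List (Int × Int) :=
  if tags = [] then []
  else
    let starts : List Int := 0 ::
      (PySem.List.pyRange 1 tags.length 1).filter
        (fun i => PySem.List.pyGetD tags i "" == "B" || PySem.List.pyGetD tags i "" == "S")
    (starts.zip (starts.tail ++ [(tags.length : Int)])).map (fun p => (p.1, p.2 - p.1))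

-- ===== PRECONDITION & SPEC =====
def Spec_bmes_to_index (tags : List String) (out : List (Int × Int)) : Prop := out = bmes_to_index_alt tags
instance (tags : List String) (out : List (Int × Int)) : Decidable (Spec_bmes_to_index tags out) := by unfold Spec_bmes_to_index; infer_instance

-- ===== CLAIM (what is proved, stated in full; the proofs are below) =====
def Claim_equal_bmes_to_index : Prop := ∀ (tags : List String), Dom_bmes_to_index tags → Spec_bmes_to_index tags (bmes_to_index tags)

-- ===== LEMMAS AND PROOFS =====

-- chunk-start indices of xs, whose first element sits at absolute index i
def startsFrom (i : Int) : List String → List Int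
  | [] => []
  | t :: ts => if t = "B" ∨ t = "S" then i :: startsFrom (i + 1) ts else startsFrom (i + 1) ts

-- spans (start, length) from a start s, the later starts, and the total length
def buildSpans (s : Int) : List Int → Int → List (Int × Int)
  | [], len => [(s, len - s)]
  | s' :: rest, len => (s, s' - s) :: buildSpans s' rest len

-- A's trailing flush
def flushA (st : List (Int × Int) × (Int × Int)) : List (Int × Int) :=
  if st.2.2 ≠ 0 then st.1 ++ [st.2] else st.1

lemma loopA_eq (xs : List String) : ∀ (res : List (Int × Int)) (s i : Int), 0 ≤ s → s < i →
    flushA ((PySem.List.enumerate xs i).foldl bmesStep (res, (s, i - s)))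
      = res ++ buildSpans s (startsFrom i xs) (i + xs.length) := by
  induction xs with
  | nil =>
    intro res s i hs hsi
    simp [PySem.List.enumerate_nil, flushA, buildSpans, startsFrom]
    omega
  | cons t ts ih =>
    intro res s i hs hsi
    rw [PySem.List.enumerate_cons]
    simp only [List.foldl_cons]
    have hi0 : ¬ (i = 0) := by omega
    by_cases hbs : t = "B" ∨ t = "S"
    · have hstep : bmesStep (res, (s, i - s)) (i, t) = (res ++ [(s, i - s)], (i, 1)) := by
        simp [bmesStep, hi0, hbs]
      rw [hstep]
      rw [show ((res ++ [(s, i - s)], ((i : Int), (1 : Int))) :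
            List (Int × Int) × (Int × Int)) = (res ++ [(s, i - s)], (i, i + 1 - i)) by
        simp]
      rw [ih (res ++ [(s, i - s)]) i (i + 1) (by omega) (by omega)]
      have hlen : i + 1 + (ts.length : Int) = i + ((t :: ts).length : Int) := by push_cast [List.length_cons]; ring
      rw [hlen]
      simp [startsFrom, hbs, buildSpans]
    · have hstep : bmesStep (res, (s, i - s)) (i, t) = (res, (s, i + 1 - s)) := by
        simp [bmesStep, hi0, hbs]
        ring
      rw [hstep]
      rw [ih res s (i + 1) hs (by omega)]
      have hlen : i + 1 + (ts.length : Int) = i + ((t :: ts).length : Int) := by push_cast [List.length_cons]; ring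
      rw [hlen]
      simp [startsFrom, hbs]

lemma filter_starts : ∀ (xs pre : List String),
    (PySem.List.pyRange (pre.length : Int) ((pre.length + xs.length : Nat) : Int) 1).filter
        (fun j => PySem.List.pyGetD (pre ++ xs) j "" == "B" ||
                  PySem.List.pyGetD (pre ++ xs) j "" == "S")
      = startsFrom (pre.length : Int) xs := by
  intro xs
  induction xs with
  | nil =>
    intro pre
    simp [PySem.List.pyRange_one_eq_nil, startsFrom]
  | cons t ts ih =>
    intro pre
    have hlt : (pre.length : Int) < ((pre.length + (t :: ts).length : Nat) : Int) := by
      simp only [List.length_cons]; push_cast; omega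
    rw [PySem.List.pyRange_one_cons hlt]
    have hget : PySem.List.pyGetD (pre ++ t :: ts) (pre.length : Int) "" = t := by
      rw [PySem.List.pyGetD_natCast]
      simp [List.getD]
    have := ih (pre ++ [t])
    simp only [List.length_append, List.length_cons, List.length_nil] at this ⊢
    rw [List.filter_cons]
    simp only [hget]
    have harr : (pre ++ [t]) ++ ts = pre ++ t :: ts := by simp
    rw [harr] at this
    by_cases hbs : t = "B" ∨ t = "S"
    · have hb : (t == "B" || t == "S") = true := by
        rcases hbs with h | h <;> simp [h]
      simp only [hb, if_true, startsFrom, hbs, if_true]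
      rw [show ((pre.length : Int) + 1) = ((pre.length + 1 : Nat) : Int) by push_cast; ring]
      rw [show ((pre.length + (ts.length + 1) : Nat) : Int) = ((pre.length + 1 + ts.length : Nat) : Int) by push_cast; ring]
      exact congrArg _ this
    · have hb : (t == "B" || t == "S") = false := by
        push_neg at hbs
        simp [hbs.1, hbs.2]
      simp only [hb, if_false, Bool.false_eq_true, startsFrom, hbs]
      rw [show ((pre.length : Int) + 1) = ((pre.length + 1 : Nat) : Int) by push_cast; ring]
      rw [show ((pre.length + (ts.length + 1) : Nat) : Int) = ((pre.length + 1 + ts.length : Nat) : Int) by push_cast; ring]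
      simpa using this

lemma zip_spans : ∀ (l : List Int) (s len : Int),
    ((s :: l).zip (l ++ [len])).map (fun p => (p.1, p.2 - p.1)) = buildSpans s l len := by
  intro l
  induction l with
  | nil => intro s len; simp [buildSpans]
  | cons a l' ih =>
    intro s len
    simp only [List.cons_append, List.zip_cons_cons, List.map_cons, buildSpans]
    exact congrArg _ (ih a len)

-- ===== VERDICT (by name: the statement is the Claim_ definition above) =====
theorem bmes_to_index_spec : Claim_equal_bmes_to_index := by
  intro tags _
  unfold Spec_bmes_to_index
  cases tags with
  | nil => simp [bmes_to_index, bmes_to_index_alt]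
  | cons t0 rest =>
    unfold bmes_to_index bmes_to_index_alt
    simp only [List.length_cons, Nat.succ_ne_zero, if_false, ne_eq, reduceCtorEq]
    rw [PySem.List.enumerate_cons]
    simp only [List.foldl_cons]
    have hstep0 : bmesStep ([], (0, 0)) (0, t0) = ([], (0, 1)) := by
      simp [bmesStep]
    rw [hstep0]
    have hloop := loopA_eq rest [] 0 1 (by omega) (by omega)
    simp only [flushA, ne_eq] at hloop
    norm_num at hloop
    simp only [zero_add]
    rw [ite_not, hloop]
    have hF2 : (PySem.List.pyRange 1 ((rest.length + 1 : Nat) : Int) 1).filter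
        (fun i => PySem.List.pyGetD (t0 :: rest) i "" == "B" ||
                  PySem.List.pyGetD (t0 :: rest) i "" == "S") = startsFrom 1 rest := by
      have h := filter_starts rest [t0]
      simp only [List.length_cons, List.length_nil, List.singleton_append] at h
      rw [show ((rest.length + 1 : Nat) : Int) = ((0 + 1 : Nat) + rest.length : Nat) by push_cast; ring]
      simpa using h
    rw [hF2, List.tail_cons,
      zip_spans (startsFrom 1 rest) 0 ((rest.length + 1 : Nat) : Int)]
    congr 1
    push_cast
    ring
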